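-- pv_equiv track=rewrite | github.com/heejunns/algorithm | 프로그래머스 문제풀이/programmers_78_.py | solution
-- ===== SOURCE A (Python) =====
-- def solution(k, m, score):
--     answer = 0
--     score.sort()
--     score.reverse()
--     x = []
--     for i in score:
--         x.append(i)
--         if len(x) == m:
--             answer+= (m*min(x))
--             x = []
--     return answer
-- ===== SOURCE B (Python) =====
-- def solution(k, m, score):
--     score.sort(reverse=True)
--     return m * sum(score[i] for i in range(m - 1, len(score), m))
-- ===== Notes on version B (the rewrite author's own statement) =====
-- stated objective: simpler
-- what changed: Instead of buffering each group of m in a list and calling min on it, B sorts descending and directly sums the group minima at strided indices m-1, 2m-1, ... (the last element of each descending group is its minimum), dropping the buffer and the min() calls.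
-- outside the precondition, e.g. on solution(0, 0, [1, 2]): A returns 0, B raises ValueError
import Mathlib
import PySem

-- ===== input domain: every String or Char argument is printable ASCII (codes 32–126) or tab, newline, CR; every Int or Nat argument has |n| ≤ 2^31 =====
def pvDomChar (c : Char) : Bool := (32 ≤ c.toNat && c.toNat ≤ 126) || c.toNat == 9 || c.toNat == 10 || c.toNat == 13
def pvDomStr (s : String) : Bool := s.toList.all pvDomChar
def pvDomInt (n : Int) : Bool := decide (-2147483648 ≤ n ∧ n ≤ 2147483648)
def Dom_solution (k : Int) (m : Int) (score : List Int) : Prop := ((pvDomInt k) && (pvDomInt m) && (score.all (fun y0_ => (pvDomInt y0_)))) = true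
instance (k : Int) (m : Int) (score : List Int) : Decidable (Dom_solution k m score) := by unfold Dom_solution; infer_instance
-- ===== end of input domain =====

-- B replaces A's group buffer + min() by a single strided sum over the descending-sorted list (objective: simpler).
-- Both A and B sort `score` descending in place; the equivalence proved here is about the return value.

-- ===== PORT A =====
-- literal port of A: sort ascending, reverse, then fold keeping (answer, buffer x);
-- min(x) is ported as (min? x).getD 0 — the branch only fires with x nonempty, so the default is never used
def solution (k : Int) (m : Int) (score : List Int) : Int :=
  let s := (PySem.List.sorted score (fun y => y) false).reverse
  (s.foldl (fun (st : Int × List Int) i =>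
      let x := st.2 ++ [i]
      if (x.length : Int) = m then
        (st.1 + m * ((PySem.List.min? x (fun y => y)).getD 0), ([] : List Int))
      else (st.1, x)) ((0 : Int), ([] : List Int))).1

-- ===== PORT B =====
-- literal port of B: sort descending, then m * sum(score[i] for i in range(m-1, len(score), m))
def solution_alt (k : Int) (m : Int) (score : List Int) : Int :=
  let s := PySem.List.sorted score (fun y => y) true
  m * (PySem.List.pyRange (m - 1) (s.length : Int) m).foldl
        (fun acc i => acc + PySem.List.pyGetD s i 0) 0

-- ===== PRECONDITION & SPEC =====
-- Pre_ excludes m = 0 only: there A's group buffer never fills so A returns 0,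
-- while B's natural strided range(m-1, len(score), 0) raises ValueError (step 0).
def Pre_solution (k : Int) (m : Int) (score : List Int) : Prop := m ≠ 0
instance (k : Int) (m : Int) (score : List Int) : Decidable (Pre_solution k m score) := by unfold Pre_solution; infer_instance
def pvWitness_solution : Int × Int × List Int := (0, 2, [3, 1, 4, 1])

def Spec_solution (k : Int) (m : Int) (score : List Int) (out : Int) : Prop := out = solution_alt k m score
instance (k : Int) (m : Int) (score : List Int) (out : Int) : Decidable (Spec_solution k m score out) := by unfold Spec_solution; infer_instance

-- ===== CLAIM (what is proved, stated in full; the proofs are below) =====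
def Claim_equal_solution : Prop := ∀ (k : Int) (m : Int) (score : List Int), Dom_solution k m score → Pre_solution k m score → Spec_solution k m score (solution k m score)

-- ===== LEMMAS AND PROOFS =====

-- A's loop body, named for the proofs
def stepA (m : Int) (st : Int × List Int) (i : Int) : Int × List Int :=
  let x := st.2 ++ [i]
  if (x.length : Int) = m then
    (st.1 + m * ((PySem.List.min? x (fun y => y)).getD 0), ([] : List Int))
  else (st.1, x)

lemma solution_eq_fold (k m : Int) (score : List Int) :
    solution k m score
      = (((PySem.List.sorted score (fun y => y) false).reverse).foldl (stepA m) (0, [])).1 := rfl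

lemma solution_alt_eq (k m : Int) (score : List Int) :
    solution_alt k m score
      = m * (PySem.List.pyRange (m - 1) ((PySem.List.sorted score (fun y => y) true).length : Int) m).foldl
          (fun acc i => acc + PySem.List.pyGetD (PySem.List.sorted score (fun y => y) true) i 0) 0 := rfl

-- pyRange facts for an arbitrary positive step (specific shifted/cons forms this proof needs)
lemma pr_nil_of_nonpos {s : Int} (a b : Int) (hs : s < 0) (hab : a ≤ b) :
    PySem.List.pyRange a b s = [] := by
  simp only [PySem.List.pyRange, if_neg (show ¬ s = 0 by omega)]
  rw [if_neg (by omega : ¬ 0 < s), if_neg (by omega : ¬ b < a)]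
  simp

lemma pr_nil_of_le {s : Int} (a b : Int) (hs : 0 < s) (hab : b ≤ a) :
    PySem.List.pyRange a b s = [] := by
  rw [PySem.List.pyRange_of_pos a b hs, if_neg (by omega : ¬ a < b)]
  simp

lemma pr_cons {s : Int} (a b : Int) (hs : 0 < s) (hab : a < b) :
    PySem.List.pyRange a b s = a :: PySem.List.pyRange (a + s) b s := by
  rw [PySem.List.pyRange_of_pos a b hs, PySem.List.pyRange_of_pos (a + s) b hs]
  have hcnt : (if a < b then ((b - a + s - 1) / s).toNat else 0)
      = (if a + s < b then ((b - (a + s) + s - 1) / s).toNat else 0) + 1 := by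
    by_cases h2 : a + s < b
    · rw [if_pos hab, if_pos h2]
      have e : b - a + s - 1 = (b - (a + s) + s - 1) + 1 * s := by ring
      rw [e, Int.add_mul_ediv_right _ _ (by omega : s ≠ 0)]
      have hnn : 0 ≤ (b - (a + s) + s - 1) / s := Int.ediv_nonneg (by omega) (by omega)
      omega
    · rw [if_pos hab, if_neg h2]
      have h0 : (b - a - 1) / s = 0 := Int.ediv_eq_zero_of_lt (by omega) (by omega)
      have e : b - a + s - 1 = (b - a - 1) + 1 * s := by ring
      rw [e, Int.add_mul_ediv_right _ _ (by omega : s ≠ 0), h0]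
      rfl
  rw [hcnt, List.range_succ_eq_map]
  simp only [List.map_cons, Nat.cast_zero, mul_zero, add_zero, List.map_map]
  congr 1
  apply List.map_congr_left
  intro x _
  simp only [Function.comp_apply]
  push_cast
  ring

lemma pr_shift {s : Int} (a b : Int) (hs : 0 < s) :
    PySem.List.pyRange (a + s) b s = (PySem.List.pyRange a (b - s) s).map (fun x => x + s) := by
  rw [PySem.List.pyRange_of_pos (a + s) b hs, PySem.List.pyRange_of_pos a (b - s) hs]
  have hcnt : (if a + s < b then ((b - (a + s) + s - 1) / s).toNat else 0)
      = (if a < b - s then ((b - s - a + s - 1) / s).toNat else 0) := by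
    by_cases h : a + s < b
    · rw [if_pos h, if_pos (by omega)]
      congr 2
      ring
    · rw [if_neg h, if_neg (by omega)]
  rw [hcnt, List.map_map]
  apply List.map_congr_left
  intro x _
  simp only [Function.comp_apply]
  ring

-- A's loop with m ≤ 0 never fills the buffer: the answer component stays put
lemma stepA_fst_of_nonpos {m : Int} (hm : m ≤ 0) :
    ∀ (l : List Int) (a : Int) (x : List Int), (l.foldl (stepA m) (a, x)).1 = a := by
  intro l
  induction l with
  | nil => intro a x; rfl
  | cons i t ih =>
      intro a x
      have hne : ¬ (((x ++ [i]).length : Int) = m) := by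
        simp only [List.length_append, List.length_cons, List.length_nil]
        push_cast; omega
      simp only [List.foldl_cons, stepA, if_neg hne]
      exact ih a (x ++ [i])

-- running A's loop over fewer elements than the buffer needs just appends them
lemma stepA_buffer (m : Int) :
    ∀ (l x : List Int) (a : Int), (x.length : Int) + l.length < m →
      l.foldl (stepA m) (a, x) = (a, x ++ l) := by
  intro l
  induction l with
  | nil => intro x a _; simp
  | cons i t ih =>
      intro x a hlt
      have hne : ¬ (((x ++ [i]).length : Int) = m) := by
        simp only [List.length_append, List.length_cons, List.length_nil]
        simp only [List.length_cons] at hlt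
        push_cast at hlt ⊢; omega
      simp only [List.foldl_cons, stepA, if_neg hne]
      rw [ih (x ++ [i]) a (by simp only [List.length_append, List.length_cons, List.length_nil] at hlt ⊢; push_cast at hlt ⊢; omega)]
      simp

-- feeding A's loop exactly one full group (buffer x, then c) emits m * min and clears the buffer
lemma stepA_fill (m : Int) :
    ∀ (c x : List Int) (a : Int) (rest : List Int),
      ((x ++ c).length : Int) = m → c ≠ [] →
      (c ++ rest).foldl (stepA m) (a, x)
        = rest.foldl (stepA m) (a + m * ((PySem.List.min? (x ++ c) (fun y => y)).getD 0), []) := by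
  intro c
  induction c with
  | nil => intro x a rest _ hne; exact absurd rfl hne
  | cons i t ih =>
      intro x a rest hlen _
      by_cases ht : t = []
      · subst ht
        have : (((x ++ [i]).length : Int) = m) := by simpa using hlen
        simp only [List.cons_append, List.nil_append, List.foldl_cons, stepA, if_pos this]
      · have hne : ¬ (((x ++ [i]).length : Int) = m) := by
          have : 0 < t.length := List.length_pos_iff.mpr ht
          simp only [List.length_append, List.length_cons, List.length_nil] at hlen ⊢
          push_cast at hlen ⊢; omega
        simp only [List.cons_append, List.foldl_cons, stepA, if_neg hne]
        have := ih (x ++ [i]) a rest (by simpa using hlen) ht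
        simpa using this

-- on a nonincreasing list, the min of the first group of m is the element at index m-1
lemma min_take_eq {m : Int} (hm : 1 ≤ m) (l : List Int)
    (hp : l.Pairwise (fun a b => b ≤ a)) (hlen : m ≤ (l.length : Int)) :
    (PySem.List.min? (l.take m.toNat) (fun y => y)).getD 0 = PySem.List.pyGetD l (m - 1) 0 := by
  have hmn : (m - 1).toNat < l.length := by omega
  have hidx : (m - 1).toNat < (l.take m.toNat).length := by
    simp [List.length_take]; omega
  have hget : PySem.List.pyGetD l (m - 1) 0 = l[(m - 1).toNat] :=
    PySem.List.pyGetD_eq_getElem l 0 (by omega) (by omega)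
  have htake_get : (l.take m.toNat)[(m - 1).toNat]'hidx = l[(m - 1).toNat] := by
    simp
  have hne : l.take m.toNat ≠ [] := by
    intro h; rw [h] at hidx; simp at hidx
  obtain ⟨mv, hmv⟩ : ∃ mv, PySem.List.min? (l.take m.toNat) (fun y => y) = some mv := by
    cases hh : PySem.List.min? (l.take m.toNat) (fun y => y) with
    | none => exact absurd (((PySem.List.min?_eq_none_iff _ _).mp hh)) hne
    | some mv => exact ⟨mv, rfl⟩
  rw [hmv, Option.getD_some, hget]
  have hmem := PySem.List.min?_mem hmv
  have hle : mv ≤ l[(m - 1).toNat] := by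
    have := PySem.List.min?_isMin hmv (l[(m - 1).toNat]) (by rw [← htake_get]; exact List.getElem_mem hidx)
    simpa using this
  have hge : l[(m - 1).toNat] ≤ mv := by
    obtain ⟨j, hj, hjv⟩ := List.getElem_of_mem hmem
    have hjl : (l.take m.toNat)[j]'hj = l[j]'(by simp at hj; omega) := by simp
    have hjlt : j < l.length := by simp at hj; omega
    have hpw := List.pairwise_iff_getElem.mp hp
    rcases lt_trichotomy j (m - 1).toNat with h | h | h
    · have := hpw j (m - 1).toNat hjlt hmn h
      rw [← hjv, hjl]; exact this
    · rw [← hjv, hjl]; simp [h]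
    · exfalso; simp [List.length_take] at hj; omega
  omega

-- the strided sum over range(m-1, len, m) as a mapped sum
lemma strided_sum (m : Int) (l : List Int) :
    (PySem.List.pyRange (m - 1) (l.length : Int) m).foldl
        (fun acc i => acc + PySem.List.pyGetD l i 0) 0
      = ((PySem.List.pyRange (m - 1) (l.length : Int) m).map (fun i => PySem.List.pyGetD l i 0)).sum := by
  rw [PySem.List.foldl_add]; simp

-- getD through drop
lemma pyGetD_drop (l : List Int) (n : Nat) (i : Int) (hi : 0 ≤ i) :
    PySem.List.pyGetD (l.drop n) i 0 = PySem.List.pyGetD l (i + n) 0 := by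
  rw [PySem.List.pyGetD_of_nonneg _ _ hi, PySem.List.pyGetD_of_nonneg _ _ (by omega)]
  have : (i + (n : Int)).toNat = n + i.toNat := by omega
  rw [this]
  simp only [List.getD, List.getElem?_drop]

-- one peeling step of the strided mapped sum
lemma strided_peel {m : Int} (hm : 1 ≤ m) (l : List Int) (hlen : m ≤ (l.length : Int)) :
    ((PySem.List.pyRange (m - 1) (l.length : Int) m).map (fun i => PySem.List.pyGetD l i 0)).sum
      = PySem.List.pyGetD l (m - 1) 0
        + ((PySem.List.pyRange (m - 1) ((l.drop m.toNat).length : Int) m).map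
            (fun i => PySem.List.pyGetD (l.drop m.toNat) i 0)).sum := by
  rw [pr_cons (m - 1) (l.length : Int) (by omega) (by omega)]
  rw [List.map_cons, List.sum_cons]
  congr 1
  rw [pr_shift (m - 1) (l.length : Int) (by omega), List.map_map]
  congr 1
  have hlen' : ((l.drop m.toNat).length : Int) = (l.length : Int) - m := by
    simp [List.length_drop]; omega
  rw [hlen']
  apply List.map_congr_left
  intro i hi
  have hmem := (PySem.List.mem_pyRange_iff_of_pos (by omega : (0:Int) < m) i).mp hi
  simp only [Function.comp]
  rw [pyGetD_drop l m.toNat i (by omega)]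
  congr 1
  omega

-- the main invariant: A's fold over a nonincreasing list is the strided sum of group minima
lemma chunk {m : Int} (hm : 1 ≤ m) :
    ∀ (n : Nat) (l : List Int), l.length = n → l.Pairwise (fun a b => b ≤ a) → ∀ (a : Int),
      (l.foldl (stepA m) (a, [])).1
        = a + m * ((PySem.List.pyRange (m - 1) (l.length : Int) m).map
            (fun i => PySem.List.pyGetD l i 0)).sum := by
  intro n
  induction n using Nat.strong_induction_on with
  | _ n ih =>
    intro l hln hp a
    by_cases hlt : (l.length : Int) < m
    · rw [stepA_buffer m l [] a (by simpa using hlt)]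
      rw [pr_nil_of_le (m - 1) (l.length : Int) (by omega) (by omega)]
      simp
    · rw [not_lt] at hlt
      have hsplit := List.take_append_drop m.toNat l
      have hclen : ((([] : List Int) ++ l.take m.toNat).length : Int) = m := by
        simp only [List.nil_append, List.length_take]
        omega
      have hcne : l.take m.toNat ≠ [] := by
        intro h
        have h2 : (l.take m.toNat).length = 0 := by rw [h]; rfl
        rw [List.length_take] at h2
        omega
      conv_lhs => rw [← hsplit]
      rw [stepA_fill m (l.take m.toNat) [] a (l.drop m.toNat) hclen hcne]
      have hdlen : (l.drop m.toNat).length < n := by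
        simp [List.length_drop]; omega
      rw [ih (l.drop m.toNat).length hdlen (l.drop m.toNat) rfl (hp.drop) _]
      rw [List.nil_append, min_take_eq hm l hp hlt]
      rw [strided_peel hm l hlt]
      ring

-- the two sort orders produce the same descending list
lemma sorted_rev_eq (xs : List Int) :
    (PySem.List.sorted xs (fun y => y) false).reverse = PySem.List.sorted xs (fun y => y) true := by
  have h : (PySem.List.sorted xs (fun y => y) true).reverse = PySem.List.sorted xs (fun y => y) false := by
    apply PySem.List.eq_of_perm_of_pairwise_le_of_injective (fun y => y) (fun a b h => h)
    · exact ((List.reverse_perm _).trans (PySem.List.sorted_perm xs (fun y => y) true)).trans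
        (PySem.List.sorted_perm xs (fun y => y) false).symm
    · exact (List.pairwise_reverse.mpr (by simpa using PySem.List.sorted_pairwise_rev xs (fun y => y)))
    · simpa using PySem.List.sorted_pairwise xs (fun y => y)
  rw [← h, List.reverse_reverse]

-- ===== VERDICT (by name: the statement is the Claim_ definition above) =====
theorem solution_spec : Claim_equal_solution := by
  intro k m score _ hpre
  unfold Spec_solution
  rw [solution_alt_eq, solution_eq_fold, sorted_rev_eq]
  set l := PySem.List.sorted score (fun y => y) true with hl
  rcases lt_trichotomy m 0 with hm | hm | hm
  · rw [stepA_fst_of_nonpos (by omega) l 0 []]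
    rw [pr_nil_of_nonpos (m - 1) (l.length : Int) (by omega) (by omega)]
    simp
  · exact absurd hm hpre
  · rw [chunk (by omega) l.length l rfl (by simpa using PySem.List.sorted_pairwise_rev score (fun y => y)) 0]
    rw [strided_sum m l]
    ring
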